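-- pv_equiv track=rewrite | github.com/robertsn808/SPANK | performance_monitor.py | _generate_immediate_recommendations
-- ===== SOURCE A (Python) =====
-- from collections import defaultdict
--
-- def _generate_immediate_recommendations(alerts):
--     """Generate immediate actionable recommendations"""
--     if not alerts:
--         return ["Continue current performance - all metrics within healthy ranges"]
--
--     recommendations = []
--
--     # Group alerts by category
--     alert_categories = defaultdict(list)
--     for alert in alerts:
--         alert_categories[alert['category']].append(alert)
--
--     # Generate category-specific recommendations
--     for category, category_alerts in alert_categories.items():
--         if category == 'Sales Performance':
--             recommendations.append("Immediate: Review and adjust pricing strategy for better conversion")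
--         elif category == 'Operational Efficiency':
--             recommendations.append("Priority: Optimize crew scheduling and project workflows")
--         elif category == 'Customer Relations':
--             recommendations.append("Focus: Implement customer retention and follow-up programs")
--         elif category == 'Financial Performance':
--             recommendations.append("Urgent: Enhance marketing and business development efforts")
--         elif category == 'Cash Flow':
--             recommendations.append("Action: Accelerate invoice collection and payment processing")
--
--     return recommendations[:3]  # Top 3 recommendations
-- ===== SOURCE B (Python) =====
-- _REC = {
--     'Sales Performance': "Immediate: Review and adjust pricing strategy for better conversion",
--     'Operational Efficiency': "Priority: Optimize crew scheduling and project workflows",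
--     'Customer Relations': "Focus: Implement customer retention and follow-up programs",
--     'Financial Performance': "Urgent: Enhance marketing and business development efforts",
--     'Cash Flow': "Action: Accelerate invoice collection and payment processing",
-- }
--
-- def _generate_immediate_recommendations(alerts):
--     """Generate immediate actionable recommendations"""
--     if not alerts:
--         return ["Continue current performance - all metrics within healthy ranges"]
--     # worklist algorithm: consume alerts; whenever a recommendation fires, purge
--     # every remaining alert of that category from the worklist, so no 'seen' set
--     # (and no grouping dict) is ever needed; stop as soon as 3 are collected.
--     out = []
--     rest = alerts
--     while rest and len(out) < 3:
--         head, rest = rest[0], rest[1:]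
--         c = head['category']
--         r = _REC.get(c)
--         if r is not None:
--             out.append(r)
--             rest = [x for x in rest if x['category'] != c]
--     return out
-- ===== Notes on version B (the rewrite author's own statement) =====
-- stated objective: alternative
-- what changed: B replaces A's two-phase group-into-defaultdict-then-walk-the-elif-chain with a destructive worklist: it consumes alerts one by one, purges the remaining worklist of a category once its recommendation fires (so no grouping dict and no seen set exist), and stops as soon as 3 recommendations are collected instead of slicing at the end.
import Mathlib
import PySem

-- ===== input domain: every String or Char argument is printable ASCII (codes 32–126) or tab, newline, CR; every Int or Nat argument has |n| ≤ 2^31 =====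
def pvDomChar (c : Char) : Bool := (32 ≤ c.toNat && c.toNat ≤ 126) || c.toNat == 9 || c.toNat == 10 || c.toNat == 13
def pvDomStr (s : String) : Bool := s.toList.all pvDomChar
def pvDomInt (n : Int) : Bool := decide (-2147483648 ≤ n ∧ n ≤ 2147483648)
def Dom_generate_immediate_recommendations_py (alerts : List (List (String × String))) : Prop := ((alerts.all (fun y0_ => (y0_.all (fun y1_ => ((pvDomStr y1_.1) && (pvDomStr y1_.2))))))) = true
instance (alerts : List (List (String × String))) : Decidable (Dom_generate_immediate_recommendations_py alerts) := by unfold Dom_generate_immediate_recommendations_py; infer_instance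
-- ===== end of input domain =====

-- B replaces A's group-into-defaultdict-then-elif-chain with a destructive worklist: it consumes
-- alerts, purges the worklist of a category once its recommendation fires, and stops at 3.

-- ===== PORT A =====
-- alert['category'] (present on every alert by Pre_)
def pvCat (a : List (String × String)) : String :=
  (PySem.Dict.mk a).getD "category" ""

def generate_immediate_recommendations_py (alerts : List (List (String × String))) : List String :=
  if alerts = [] then
    ["Continue current performance - all metrics within healthy ranges"]
  else
    -- alert_categories = defaultdict(list); for alert in alerts: alert_categories[alert['category']].append(alert)
    let alert_categories : PySem.Dict String (List (List (String × String))) :=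
      alerts.foldl (fun d a => d.modify (pvCat a) [] (fun l => l ++ [a])) PySem.Dict.empty
    -- for category, category_alerts in alert_categories.items(): if/elif chain
    let recommendations : List String :=
      alert_categories.items.foldl (fun recs ci =>
        if ci.1 = "Sales Performance" then recs ++ ["Immediate: Review and adjust pricing strategy for better conversion"]
        else if ci.1 = "Operational Efficiency" then recs ++ ["Priority: Optimize crew scheduling and project workflows"]
        else if ci.1 = "Customer Relations" then recs ++ ["Focus: Implement customer retention and follow-up programs"]
        else if ci.1 = "Financial Performance" then recs ++ ["Urgent: Enhance marketing and business development efforts"]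
        else if ci.1 = "Cash Flow" then recs ++ ["Action: Accelerate invoice collection and payment processing"]
        else recs) []
    -- recommendations[:3]
    PySem.List.slice recommendations none (some 3)

-- ===== PORT B =====
-- module-level table _REC
def pvRecs : PySem.Dict String String := PySem.Dict.mk
  [("Sales Performance", "Immediate: Review and adjust pricing strategy for better conversion"),
   ("Operational Efficiency", "Priority: Optimize crew scheduling and project workflows"),
   ("Customer Relations", "Focus: Implement customer retention and follow-up programs"),
   ("Financial Performance", "Urgent: Enhance marketing and business development efforts"),
   ("Cash Flow", "Action: Accelerate invoice collection and payment processing")]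

-- the while loop: out, rest are the loop state; 'rest = [x for x in rest if x['category'] != c]'
def pvLoop : List (List (String × String)) → List String → List String
  | [], out => out
  | head :: tail, out =>
      if out.length < 3 then
        match pvRecs.get? (pvCat head) with
        | some r => pvLoop (tail.filter (fun x => pvCat x != pvCat head)) (out ++ [r])
        | none => pvLoop tail out
      else out
termination_by rest _ => rest.length
decreasing_by
  · simp only [List.length_unattach, List.length_cons]
    exact Nat.lt_succ_of_le (le_trans (List.length_filter_le _ _) (by simp))
  · simp only [List.length_cons]
    exact Nat.lt_succ_self _

def generate_immediate_recommendations_py_alt (alerts : List (List (String × String))) : List String :=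
  if alerts = [] then
    ["Continue current performance - all metrics within healthy ranges"]
  else
    pvLoop alerts []

-- ===== PRECONDITION & SPEC =====
-- Pre_ excludes exactly the inputs on which A raises KeyError: an alert dict with no 'category' key.
def Pre_generate_immediate_recommendations_py (alerts : List (List (String × String))) : Prop :=
  ∀ a ∈ alerts, (PySem.Dict.mk a).contains "category" = true
instance (alerts : List (List (String × String))) : Decidable (Pre_generate_immediate_recommendations_py alerts) := by unfold Pre_generate_immediate_recommendations_py; infer_instance
def pvWitness_generate_immediate_recommendations_py : (List (List (String × String))) :=
  [[("category", "Cash Flow")], [("category", "Sales Performance")]]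

def Spec_generate_immediate_recommendations_py (alerts : List (List (String × String))) (out : List String) : Prop := out = generate_immediate_recommendations_py_alt alerts
instance (alerts : List (List (String × String))) (out : List String) : Decidable (Spec_generate_immediate_recommendations_py alerts out) := by unfold Spec_generate_immediate_recommendations_py; infer_instance

-- ===== CLAIM (what is proved, stated in full; the proofs are below) =====
def Claim_equal_generate_immediate_recommendations_py : Prop := ∀ (alerts : List (List (String × String))), Dom_generate_immediate_recommendations_py alerts → Pre_generate_immediate_recommendations_py alerts → Spec_generate_immediate_recommendations_py alerts (generate_immediate_recommendations_py alerts)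

-- ===== LEMMAS AND PROOFS =====

-- the per-category recommendation, shared by both readings
def pvRecOf (c : String) : Option String := pvRecs.get? c

-- A's if/elif chain step agrees with the table lookup
lemma pvChain_eq (recs : List String) (c : String) :
    (if c = "Sales Performance" then recs ++ ["Immediate: Review and adjust pricing strategy for better conversion"]
     else if c = "Operational Efficiency" then recs ++ ["Priority: Optimize crew scheduling and project workflows"]
     else if c = "Customer Relations" then recs ++ ["Focus: Implement customer retention and follow-up programs"]
     else if c = "Financial Performance" then recs ++ ["Urgent: Enhance marketing and business development efforts"]
     else if c = "Cash Flow" then recs ++ ["Action: Accelerate invoice collection and payment processing"]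
     else recs)
    = recs ++ (pvRecOf c).toList := by
  by_cases h1 : c = "Sales Performance"
  · simp [h1, pvRecOf, pvRecs, PySem.Dict.get?_mk_cons]
  by_cases h2 : c = "Operational Efficiency"
  · simp [h2, pvRecOf, pvRecs, PySem.Dict.get?_mk_cons]
  by_cases h3 : c = "Customer Relations"
  · simp [h3, pvRecOf, pvRecs, PySem.Dict.get?_mk_cons]
  by_cases h4 : c = "Financial Performance"
  · simp [h4, pvRecOf, pvRecs, PySem.Dict.get?_mk_cons]
  by_cases h5 : c = "Cash Flow"
  · simp [h5, pvRecOf, pvRecs, PySem.Dict.get?_mk_cons]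
  have hnone : pvRecOf c = none := by
    simp only [pvRecOf, pvRecs, PySem.Dict.get?_mk_cons, beq_iff_eq]
    simp only [if_neg (Ne.symm h1), if_neg (Ne.symm h2), if_neg (Ne.symm h3),
      if_neg (Ne.symm h4), if_neg (Ne.symm h5)]
    rfl
  simp [h1, h2, h3, h4, h5, hnone]

-- A's phase-2 fold is a filterMap of pvRecOf over the dict items
lemma pvAfold (l : List (String × List (List (String × String)))) (acc : List String) :
    l.foldl (fun recs ci =>
        if ci.1 = "Sales Performance" then recs ++ ["Immediate: Review and adjust pricing strategy for better conversion"]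
        else if ci.1 = "Operational Efficiency" then recs ++ ["Priority: Optimize crew scheduling and project workflows"]
        else if ci.1 = "Customer Relations" then recs ++ ["Focus: Implement customer retention and follow-up programs"]
        else if ci.1 = "Financial Performance" then recs ++ ["Urgent: Enhance marketing and business development efforts"]
        else if ci.1 = "Cash Flow" then recs ++ ["Action: Accelerate invoice collection and payment processing"]
        else recs) acc
    = acc ++ l.filterMap (fun ci => pvRecOf ci.1) := by
  induction l generalizing acc with
  | nil => simp
  | cons p t ih =>
      simp only [List.foldl_cons, List.filterMap_cons]
      rw [pvChain_eq]
      cases h : pvRecOf p.1 <;> simp [ih]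

-- A's output order, as a recursion over the category list
def pvAgo (seen : List String) : List String → List String
  | [] => []
  | c :: cs =>
      if c ∈ seen then pvAgo seen cs
      else (pvRecOf c).toList ++ pvAgo (seen ++ [c]) cs

lemma pvStep1 (cats : List String) (seen : List String) :
    List.filterMap pvRecOf (cats.foldl PySem.Set.add seen)
    = List.filterMap pvRecOf seen ++ pvAgo seen cats := by
  induction cats generalizing seen with
  | nil => simp [pvAgo]
  | cons c cs ih =>
      simp only [List.foldl_cons, pvAgo]
      by_cases h : c ∈ seen
      · rw [if_pos h]
        have : PySem.Set.add seen c = seen := by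
          simp [PySem.Set.add, PySem.Set.contains, h]
        rw [this, ih]
      · rw [if_neg h]
        have : PySem.Set.add seen c = seen ++ [c] := by
          simp [PySem.Set.add, PySem.Set.contains, h]
        rw [this, ih]
        simp [List.filterMap_append]
        cases hc : pvRecOf c <;> simp [hc]

-- B's deduplication, category purge style: same output as the loop starting from empty out
def pvD : List (List (String × String)) → List String
  | [] => []
  | a :: t =>
      match pvRecs.get? (pvCat a) with
      | some r => r :: pvD (t.filter (fun x => pvCat x != pvCat a))
      | none => pvD t
termination_by l => l.length
decreasing_by
  · simp only [List.length_unattach, List.length_cons]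
    exact Nat.lt_succ_of_le (le_trans (List.length_filter_le _ _) (by simp))
  · simp only [List.length_cons]
    exact Nat.lt_succ_self _

-- a seen category can be filtered out of pvAgo's input without changing the result
lemma pvAgo_filter (cats : List String) (seen : List String) (c : String) (hc : c ∈ seen) :
    pvAgo seen cats = pvAgo seen (cats.filter (fun d => d != c)) := by
  induction cats generalizing seen with
  | nil => rfl
  | cons d cs ih =>
      by_cases hdc : d = c
      · rw [hdc]
        rw [show List.filter (fun e => e != c) (c :: cs) = List.filter (fun e => e != c) cs by simp]
        simp only [pvAgo, if_pos hc]
        exact ih seen hc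
      · simp only [List.filter_cons, show (d != c) = true by simpa using hdc, if_pos]
        by_cases hd : d ∈ seen
        · simp only [pvAgo, if_pos hd]; exact ih seen hc
        · simp only [pvAgo, if_neg hd]
          rw [ih (seen ++ [d]) (List.mem_append_left _ hc)]

-- pvAgo over the mapped categories equals pvD, as long as nothing relevant is already seen
lemma pvAgo_eq_pvD_aux (n : Nat) : ∀ (rest : List (List (String × String))), rest.length ≤ n →
    ∀ seen, (∀ x ∈ rest, (pvRecOf (pvCat x)).isSome → pvCat x ∉ seen) →
    pvAgo seen (rest.map pvCat) = pvD rest := by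
  induction n with
  | zero =>
      intro rest hn seen _
      have : rest = [] := List.eq_nil_of_length_eq_zero (Nat.le_zero.mp hn)
      subst this; simp [pvAgo, pvD]
  | succ m ih =>
      intro rest hn seen hyp
      match rest with
      | [] => simp [pvAgo, pvD]
      | a :: t =>
        rw [pvD.eq_def]
        cases hr : pvRecs.get? (pvCat a) with
        | some r =>
            simp only [hr]
            have hsome : (pvRecOf (pvCat a)).isSome := by simp [pvRecOf, hr]
            have hnot : pvCat a ∉ seen := hyp a (by simp) hsome
            have hrec : (pvRecOf (pvCat a)).toList = [r] := by simp [pvRecOf, hr]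
            simp only [List.map_cons, pvAgo, if_neg hnot, hrec]
            have hhyp : ∀ x ∈ t.filter (fun x => pvCat x != pvCat a),
                (pvRecOf (pvCat x)).isSome → pvCat x ∉ seen ++ [pvCat a] := by
              intro x hx hsx hmem
              have hxt : x ∈ t := (List.mem_filter.mp hx).1
              have hne : pvCat x ≠ pvCat a := by
                have := (List.mem_filter.mp hx).2
                simpa using this
              rcases List.mem_append.mp hmem with h1 | h2
              · exact hyp x (by simp [hxt]) hsx h1
              · exact hne (by simpa using h2)
            rw [pvAgo_filter (t.map pvCat) (seen ++ [pvCat a]) (pvCat a)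
                  (List.mem_append_right _ (by simp)),
                List.filter_map]
            simp only [Function.comp_def]
            rw [ih (t.filter (fun x => pvCat x != pvCat a))
                  (le_trans (List.length_filter_le _ _) (by simpa using Nat.lt_succ_iff.mp hn))
                  (seen ++ [pvCat a]) hhyp]
            rfl
        | none =>
            simp only [hr]
            have hnonecat : pvRecOf (pvCat a) = none := by simp [pvRecOf, hr]
            simp only [List.map_cons, pvAgo]
            by_cases hc : pvCat a ∈ seen
            · rw [if_pos hc]
              exact ih t (Nat.lt_succ_iff.mp (by simpa using hn)) seen
                (fun x hx hs => hyp x (by simp [hx]) hs)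
            · rw [if_neg hc, hnonecat]
              simp only [Option.toList_none, List.nil_append]
              refine ih t (Nat.lt_succ_iff.mp (by simpa using hn)) (seen ++ [pvCat a]) ?_
              intro x hx hsx hmem
              rcases List.mem_append.mp hmem with h1 | h2
              · exact hyp x (by simp [hx]) hsx h1
              · have hxc : pvCat x = pvCat a := by simpa using h2
                rw [hxc] at hsx
                simp [hnonecat] at hsx

lemma pvAgo_eq_pvD (rest : List (List (String × String)))
    (hyp : ∀ x ∈ rest, (pvRecOf (pvCat x)).isSome → pvCat x ∉ ([] : List String)) :
    pvAgo [] (rest.map pvCat) = pvD rest :=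
  pvAgo_eq_pvD_aux rest.length rest le_rfl [] hyp

-- the worklist loop, characterised: it appends the first (3 - out.length) deduplicated hits
lemma pvLoop_eq_aux (n : Nat) : ∀ (rest : List (List (String × String))), rest.length ≤ n →
    ∀ out, pvLoop rest out = out ++ (pvD rest).take (3 - out.length) := by
  induction n with
  | zero =>
      intro rest hn out
      have : rest = [] := List.eq_nil_of_length_eq_zero (Nat.le_zero.mp hn)
      subst this; simp [pvLoop, pvD]
  | succ m ih =>
      intro rest hn out
      match rest with
      | [] => simp [pvLoop, pvD]
      | a :: t =>
        rw [pvLoop.eq_def, pvD.eq_def]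
        by_cases hlen : out.length < 3
        · simp only [if_pos hlen]
          cases hr : pvRecs.get? (pvCat a) with
          | some r =>
              dsimp only
              rw [ih (t.filter (fun x => pvCat x != pvCat a))
                    (le_trans (List.length_filter_le _ _) (by simpa using Nat.lt_succ_iff.mp hn))
                    (out ++ [r])]
              simp only [List.length_append, List.length_cons, List.length_nil]
              have h3 : 3 - out.length = (3 - (out.length + 1)) + 1 := by omega
              rw [h3, List.take_succ_cons, List.append_assoc]
              rfl
          | none =>
              dsimp only
              exact ih t (Nat.lt_succ_iff.mp (by simpa using hn)) out
        · simp only [if_neg hlen]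
          have h0 : 3 - out.length = 0 := by omega
          simp [h0]

lemma pvLoop_eq (rest : List (List (String × String))) (out : List String) :
    pvLoop rest out = out ++ (pvD rest).take (3 - out.length) :=
  pvLoop_eq_aux rest.length rest le_rfl out

-- ===== VERDICT (by name: the statement is the Claim_ definition above) =====
theorem generate_immediate_recommendations_py_spec : Claim_equal_generate_immediate_recommendations_py := by
  intro alerts _ _
  unfold Spec_generate_immediate_recommendations_py
  unfold generate_immediate_recommendations_py generate_immediate_recommendations_py_alt
  by_cases hnil : alerts = []
  · simp [hnil]
  · rw [if_neg hnil, if_neg hnil]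
    dsimp only
    rw [pvAfold]
    have hkeys : (alerts.foldl (fun d a => d.modify (pvCat a) [] (fun l => l ++ [a]))
        (PySem.Dict.empty : PySem.Dict String (List (List (String × String))))).keys
        = PySem.Set.update (PySem.Dict.empty : PySem.Dict String (List (List (String × String)))).keys (alerts.map pvCat) :=
      PySem.Dict.keys_foldl_modify_key alerts pvCat [] _ PySem.Dict.empty
    have hfm : (alerts.foldl (fun d a => d.modify (pvCat a) [] (fun l => l ++ [a]))
        (PySem.Dict.empty : PySem.Dict String (List (List (String × String))))).items.filterMap (fun ci => pvRecOf ci.1)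
        = List.filterMap pvRecOf ((alerts.map pvCat).foldl PySem.Set.add []) := by
      have hk : ∀ (d : PySem.Dict String (List (List (String × String)))),
          d.items.map (fun ci => ci.1) = d.keys := fun _ => rfl
      rw [show (fun ci : String × List (List (String × String)) => pvRecOf ci.1)
            = pvRecOf ∘ (fun ci => ci.1) from rfl,
          ← List.filterMap_map, hk, hkeys]
      rfl
    rw [List.nil_append, hfm, pvStep1]
    simp only [List.filterMap_nil, List.nil_append]
    rw [pvAgo_eq_pvD alerts (fun x _ _ => List.not_mem_nil), pvLoop_eq alerts []]
    rw [PySem.List.slice_to _ (by norm_num)]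
    simp
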